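-- pv_equiv track=rewrite | github.com/Fulano2025/fury_gramml-with-hyperparams-search | gramml/grammar/utils.py | reduce_grammar
-- ===== SOURCE A (Python) =====
-- def replace_symbol_values(grammar, old, new):
--     for symbol, options in grammar.items():
--         new_options = []
--         for option in options:
--             new_option = []
--             for elem in option:
--                 if elem == old:
--                     new_option.append(new)
--                 else:
--                     new_option.append(elem)
--             new_options.append(new_option)
--         grammar[symbol] = new_options
--     return grammar
--
-- def reduce_grammar(grammar):
--
--     reduced_grammar = grammar.copy()
--
--     for key, values in grammar.items():
--         if len(values) == 1 and len(values[0]) == 1 and not values[0][0].isupper():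
--             del reduced_grammar[key]
--             reduced_grammar = replace_symbol_values(reduced_grammar, key, values[0][0])
--
--     for key, values in reduced_grammar.items():
--         if len(values) == 1 and len(values[0]) > 1 and all([not elem.isupper() for elem in values[0]]):
--             reduced_grammar[key] = [[''.join(values[0])]]
--
--     return reduced_grammar
-- ===== SOURCE B (Python) =====
-- def reduce_grammar(grammar):
--     # one pass: collect single-terminal productions (key, terminal) in key order
--     singles = [(k, v[0][0]) for k, v in grammar.items()
--                if len(v) == 1 and len(v[0]) == 1 and not v[0][0].isupper()]
--     # resolve chains: a later single-terminal key rewrites the terminal of an earlier one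
--     subst = {}
--     for k, t in reversed(singles):
--         subst[k] = subst.get(t, t)
--     # single sweep: drop inlined keys, substitute elements, collapse all-terminal single options
--     result = {}
--     for k, v in grammar.items():
--         if k in subst:
--             continue
--         new_v = [[subst.get(e, e) for e in opt] for opt in v]
--         if len(new_v) == 1 and len(new_v[0]) > 1 and all(not e.isupper() for e in new_v[0]):
--             new_v = [[''.join(new_v[0])]]
--         result[k] = new_v
--     return result
-- ===== Notes on version B (the rewrite author's own statement) =====
-- stated objective: alternative
-- what changed: A deletes each single-terminal key one at a time and rewrites the whole remaining grammar after every deletion (one full substitution sweep per inlined key); B collects the single-terminal productions in one pass, resolves the substitution chains backwards into one lookup dict, and then does a single sweep that drops inlined keys, substitutes elements and collapses all-terminal options.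
import Mathlib
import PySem

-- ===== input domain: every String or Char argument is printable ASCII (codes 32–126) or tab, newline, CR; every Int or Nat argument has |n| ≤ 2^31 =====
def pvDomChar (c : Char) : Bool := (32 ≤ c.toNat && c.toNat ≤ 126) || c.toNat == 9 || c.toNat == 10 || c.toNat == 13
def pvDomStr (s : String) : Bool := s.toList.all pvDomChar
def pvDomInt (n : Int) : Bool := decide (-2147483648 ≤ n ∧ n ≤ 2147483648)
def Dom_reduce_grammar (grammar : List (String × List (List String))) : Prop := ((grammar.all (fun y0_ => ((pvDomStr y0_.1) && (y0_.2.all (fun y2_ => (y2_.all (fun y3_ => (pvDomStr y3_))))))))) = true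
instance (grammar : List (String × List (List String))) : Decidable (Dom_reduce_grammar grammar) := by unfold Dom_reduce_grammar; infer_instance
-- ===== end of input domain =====

-- B replaces A's per-inlined-key delete-and-rewrite sweeps of the whole grammar by one pass
-- collecting the transitively resolved terminal map plus a single substitution sweep
-- (objective: alternative algorithm, same measured cost on typical inputs).

-- Python str.isupper() restricted to the ASCII domain: at least one cased character and no
-- lowercase one (PySem provides only the Char-level isupper/islower; this composes them).
def pvIsUpperStr (s : String) : Bool :=
  s.toList.any PySem.Chars.isupper && s.toList.all (fun c => !PySem.Chars.islower c)

-- ===== PORT A =====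
-- literal port of replace_symbol_values: iterate the dict's items, rebuild every option
-- element by element with appends, reassign grammar[symbol] = new_options
def replace_symbol_values (g : PySem.Dict String (List (List String))) (old new_ : String) :
    PySem.Dict String (List (List String)) :=
  g.items.foldl (fun acc p =>
    acc.insert p.1
      (p.2.foldl (fun new_options option =>
        new_options ++
          [option.foldl (fun new_option elem =>
            if elem == old then new_option ++ [new_] else new_option ++ [elem]) []]) [])) g

def reduce_grammar (grammar : List (String × List (List String))) : List (String × List (List String)) :=
  let g : PySem.Dict String (List (List String)) := PySem.Dict.ofList grammar
  -- reduced_grammar = grammar.copy(); the first loop reads the ORIGINAL values of g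
  let reduced :=
    g.items.foldl (fun r p =>
      match p.2 with
      | [[t]] => if pvIsUpperStr t then r else replace_symbol_values (r.erase p.1) p.1 t
      | _ => r) g
  -- second loop: collapse a single all-non-uppercase option of length > 1 into one joined string
  let reduced :=
    reduced.items.foldl (fun r p =>
      match p.2 with
      | [opt] =>
          if decide (1 < opt.length) && opt.all (fun e => !pvIsUpperStr e) then
            r.insert p.1 [[PySem.Str.join "" opt]]
          else r
      | _ => r) reduced
  reduced.items

-- ===== PORT B =====
-- (v[0] / new_v[0] are read with headD, exact here because each access is guarded by the
--  length test before it, exactly as in Source B)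
def reduce_grammar_alt (grammar : List (String × List (List String))) : List (String × List (List String)) :=
  let g : PySem.Dict String (List (List String)) := PySem.Dict.ofList grammar
  -- the single-terminal productions (len(v) == 1 and len(v[0]) == 1 and not .isupper()), in key order
  let singles : List (String × String) :=
    g.items.filterMap (fun p =>
      if p.2.length == 1 && (p.2.headD []).length == 1 && !pvIsUpperStr ((p.2.headD []).headD "") then
        some (p.1, (p.2.headD []).headD "")
      else none)
  -- resolve chains backwards: subst[k] = subst.get(t, t)
  let subst : PySem.Dict String String :=
    singles.reverse.foldl (fun d q => d.insert q.1 (d.getD q.2 q.2)) PySem.Dict.empty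
  -- single sweep: skip inlined keys, substitute elements, collapse
  let result : PySem.Dict String (List (List String)) :=
    g.items.foldl (fun r p =>
      if subst.contains p.1 then r
      else
        let nv : List (List String) := p.2.map (fun opt => opt.map (fun e => subst.getD e e))
        r.insert p.1
          (if nv.length == 1 && decide (1 < (nv.headD []).length) &&
              (nv.headD []).all (fun e => !pvIsUpperStr e) then
            [[PySem.Str.join "" (nv.headD [])]]
          else nv)) PySem.Dict.empty
  result.items

-- ===== PRECONDITION & SPEC =====
def Spec_reduce_grammar (grammar : List (String × List (List String))) (out : List (String × List (List String))) : Prop := out = reduce_grammar_alt grammar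
instance (grammar : List (String × List (List String))) (out : List (String × List (List String))) : Decidable (Spec_reduce_grammar grammar out) := by unfold Spec_reduce_grammar; infer_instance

-- ===== CLAIM (what is proved, stated in full; the proofs are below) =====
def Claim_equal_reduce_grammar : Prop := ∀ (grammar : List (String × List (List String))), Dom_reduce_grammar grammar → Spec_reduce_grammar grammar (reduce_grammar grammar)

-- ===== LEMMAS AND PROOFS =====

-- one elementwise substitution step of replace_symbol_values
def pvRep (old new_ e : String) : String := if e == old then new_ else e

-- the single-terminal productions of an items list (B's `singles`)
def pvSing (l : List (String × List (List String))) : List (String × String) :=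
  l.filterMap (fun p =>
    match p.2 with
    | [[t]] => if pvIsUpperStr t then none else some (p.1, t)
    | _ => none)

-- sequential application of the substitutions, in order (what A's repeated sweeps do to one element)
def pvSeq (subs : List (String × String)) (e : String) : String :=
  subs.foldl (fun e q => if e == q.1 then q.2 else e) e

def pvSubVal (subs : List (String × String)) (v : List (List String)) : List (List String) :=
  v.map (fun opt => opt.map (pvSeq subs))

-- the first-loop condition of A, as an Option on the value
def pvCond : List (List String) → Option String
  | [[t]] => if pvIsUpperStr t then none else some t
  | _ => none

-- the second-loop condition and rewrite of A
def pvC2 : List (List String) → Bool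
  | [opt] => decide (1 < opt.length) && opt.all (fun e => !pvIsUpperStr e)
  | _ => false

def pvF2 : List (List String) → List (List String)
  | [opt] => [[PySem.Str.join "" opt]]
  | _ => []

-- the second-pass collapse, as both ports perform it
def pvCollapse (v : List (List String)) : List (List String) :=
  match v with
  | [opt] =>
      if decide (1 < opt.length) && opt.all (fun e => !pvIsUpperStr e) then
        [[PySem.Str.join "" opt]]
      else v
  | _ => v

theorem pvSeq_nil_eq : pvSeq [] = id := by funext e; rfl

theorem pvSeq_cons (k t : String) (s : List (String × String)) (e : String) :
    pvSeq ((k, t) :: s) e = pvSeq s (pvRep k t e) := rfl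

theorem pv_erase_items (d : PySem.Dict String (List (List String))) (k : String) :
    (d.erase k).items = d.items.filter (fun q => !(q.1 == k)) := rfl

-- the inner append loop of replace_symbol_values builds a map
theorem pv_inner_rep (old new_ : String) :
    ∀ (opt : List String) (acc : List String),
      opt.foldl (fun no e => if e == old then no ++ [new_] else no ++ [e]) acc
        = acc ++ opt.map (pvRep old new_) := by
  intro opt
  induction opt with
  | nil => intro acc; simp
  | cons e rest ih =>
      intro acc
      rw [List.foldl_cons, ih]
      by_cases he : e = old <;> simp [pvRep, he]

-- a foldl over a dict's OWN items that conditionally overwrites each value in place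
theorem pv_foldl_update {ν : Type} (c : String × ν → Bool) (f : String × ν → ν)
    (step : PySem.Dict String ν → String × ν → PySem.Dict String ν)
    (hstep : ∀ r p, step r p = if c p then r.insert p.1 (f p) else r) :
    ∀ (l done : List (String × ν)) (d : PySem.Dict String ν),
      d.items = done ++ l → ((done ++ l).map Prod.fst).Nodup →
      (l.foldl step d).items
        = done ++ l.map (fun p => if c p then (p.1, f p) else p) := by
  intro l
  induction l with
  | nil => intro done d hd _; simpa using hd
  | cons p rest ih =>
      intro done d hd hnd
      have hnd' := hnd
      simp only [List.map_append, List.map_cons, List.nodup_append, List.nodup_cons] at hnd'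
      obtain ⟨hnddone, ⟨hpnotrest, hndrest⟩, hdisj⟩ := hnd'
      have hdone : ∀ q ∈ done, q.1 ≠ p.1 := by
        intro q hq heq
        exact hdisj q.1 (List.mem_map_of_mem hq) p.1 (List.mem_cons_self) heq
      have hrest : ∀ q ∈ rest, q.1 ≠ p.1 := by
        intro q hq heq
        exact hpnotrest (heq ▸ List.mem_map_of_mem hq)
      rw [List.foldl_cons, hstep]
      cases hc : c p
      · -- untouched entry
        have := ih (done ++ [p]) d (by simpa using hd) (by simpa using hnd)
        simp only [Bool.false_eq_true, if_false] at this ⊢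
        simpa [List.append_assoc, hc] using this
      · -- in-place overwrite
        have hcont : d.contains p.1 = true := by
          rw [PySem.Dict.contains_iff_mem_keys]
          simp [PySem.Dict.keys, hd]
        have hitems := PySem.Dict.items_insert_of_contains d (f p) hcont
        have h1 : List.map (fun q => if (q.1 == p.1) = true then (p.1, f p) else q) done = done := by
          conv_rhs => rw [← List.map_id done]
          exact List.map_congr_left (fun q hq => by
            simp [beq_eq_false_iff_ne.mpr (hdone q hq)])
        have h2 : List.map (fun q => if (q.1 == p.1) = true then (p.1, f p) else q) rest = rest := by
          conv_rhs => rw [← List.map_id rest]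
          exact List.map_congr_left (fun q hq => by
            simp [beq_eq_false_iff_ne.mpr (hrest q hq)])
        have hitems2 : (d.insert p.1 (f p)).items = (done ++ [(p.1, f p)]) ++ rest := by
          rw [hitems, hd]
          simp only [List.map_append, List.map_cons, h1, h2]
          simp [List.append_assoc]
        have hnd2 : (((done ++ [(p.1, f p)]) ++ rest).map Prod.fst).Nodup := by
          simpa using hnd
        have := ih (done ++ [(p.1, f p)]) (d.insert p.1 (f p)) hitems2 hnd2
        simp only [if_true] at this ⊢
        simpa [List.append_assoc, hc] using this

-- unconditional corollary: rewriting every value of the dict in place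
theorem pv_foldl_insert_map {ν : Type} (f : String × ν → ν)
    (d : PySem.Dict String ν) (hnd : d.keys.Nodup) :
    (d.items.foldl (fun r p => r.insert p.1 (f p)) d).items
      = d.items.map (fun p => (p.1, f p)) := by
  rw [pv_foldl_update (fun _ => true) f _ (fun r p => by simp) d.items [] d (by simp)
    (by simpa [PySem.Dict.keys] using hnd)]
  simp

theorem pv_rsv_items (d : PySem.Dict String (List (List String))) (old new_ : String)
    (hnd : d.keys.Nodup) :
    (replace_symbol_values d old new_).items
      = d.items.map (fun p => (p.1, p.2.map (fun opt => opt.map (pvRep old new_)))) := by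
  unfold replace_symbol_values
  have hstep : (fun (acc : PySem.Dict String (List (List String))) (p : String × List (List String)) =>
      acc.insert p.1
        (p.2.foldl (fun new_options option =>
          new_options ++
            [option.foldl (fun new_option elem =>
              if elem == old then new_option ++ [new_] else new_option ++ [elem]) []]) []))
      = (fun acc p => acc.insert p.1 (p.2.map (fun opt => opt.map (pvRep old new_)))) := by
    funext acc p
    congr 1
    have : (fun (new_options : List (List String)) (option : List String) =>
        new_options ++
          [option.foldl (fun new_option elem =>
            if elem == old then new_option ++ [new_] else new_option ++ [elem]) []])
        = (fun new_options option => new_options ++ [option.map (pvRep old new_)]) := by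
      funext nos opt
      rw [pv_inner_rep]
      simp
    rw [this, PySem.List.foldl_append_singleton_eq_map]
    simp
  rw [hstep]
  exact pv_foldl_insert_map _ d hnd

-- closed form of A's first loop: every key with a single-terminal production is removed,
-- every remaining value gets all the substitutions applied, in order
theorem pv_phase1
    (step : PySem.Dict String (List (List String)) → String × List (List String) →
      PySem.Dict String (List (List String)))
    (hstep : ∀ r p, step r p
      = match pvCond p.2 with
        | some t => replace_symbol_values (r.erase p.1) p.1 t
        | none => r) :
    ∀ (l : List (String × List (List String))) (d : PySem.Dict String (List (List String))),
      d.keys.Nodup →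
      (l.foldl step d).items
        = (d.items.filter (fun q => decide (q.1 ∉ (pvSing l).map Prod.fst))).map
            (fun q => (q.1, pvSubVal (pvSing l) q.2)) := by
  intro l
  induction l with
  | nil =>
      intro d _
      simp [pvSing, pvSubVal, pvSeq_nil_eq]
  | cons p rest ih =>
      intro d hnd
      rw [List.foldl_cons, hstep]
      have hsing : pvSing (p :: rest)
          = match pvCond p.2 with
            | some t => (p.1, t) :: pvSing rest
            | none => pvSing rest := by
        obtain ⟨k, v⟩ := p
        rcases v with _ | ⟨o, os⟩
        · rfl
        rcases o with _ | ⟨t, ts⟩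
        · rcases os with _ | _ <;> rfl
        rcases ts with _ | ⟨t2, ts2⟩
        · rcases os with _ | _
          · by_cases hup : pvIsUpperStr t = true <;> simp [pvCond, pvSing, hup]
          · rfl
        · rcases os with _ | _ <;> rfl
      rw [hsing]
      cases hc : pvCond p.2 with
      | none => exact ih d hnd
      | some t =>
          have hkerase : (d.erase p.1).keys.Nodup := by
            have hsub : (d.erase p.1).keys.Sublist d.keys := by
              rw [PySem.Dict.keys, PySem.Dict.keys, pv_erase_items]
              exact List.filter_sublist.map _
            exact hsub.nodup hnd
          have hd'items := pv_rsv_items (d.erase p.1) p.1 t hkerase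
          rw [pv_erase_items] at hd'items
          have hd'keys : (replace_symbol_values (d.erase p.1) p.1 t).keys.Nodup := by
            rw [PySem.Dict.keys, hd'items, List.map_map]
            have : (Prod.fst ∘ fun (p_1 : String × List (List String)) =>
                (p_1.1, List.map (fun opt => List.map (pvRep p.1 t) opt) p_1.2)) = Prod.fst := by
              funext q; rfl
            rw [this]
            exact (List.filter_sublist.map _).nodup hnd
          rw [ih _ hd'keys, hd'items, List.filter_map, List.map_map, List.filter_filter]
          simp only [Function.comp_def]
          have hfe := List.filter_congr
            (p := fun a => decide (a.1 ∉ List.map Prod.fst (pvSing rest)) && !(a.1 == p.1))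
            (q := fun q => decide (q.1 ∉ List.map Prod.fst ((p.1, t) :: pvSing rest)))
            (l := d.items)
            (fun a _ => by
              simp only [List.map_cons]
              by_cases h1 : a.1 = p.1 <;>
                by_cases h2 : a.1 ∈ List.map Prod.fst (pvSing rest) <;> simp [h1, h2])
          rw [hfe]
          exact List.map_congr_left (fun a _ => by
            simp [pvSubVal, List.map_map, Function.comp_def, pvSeq_cons])

-- L3: the backwards-built substitution dict resolves exactly like the sequential sweeps
theorem pv_subst_getD :
    ∀ (subs : List (String × String)) (e : String),
      (subs.reverse.foldl (fun d q => d.insert q.1 (d.getD q.2 q.2)) PySem.Dict.empty).getD e e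
        = pvSeq subs e := by
  intro subs
  induction subs with
  | nil => intro e; simp [pvSeq, PySem.Dict.getD_empty]
  | cons q s ih =>
      intro e
      obtain ⟨k, t⟩ := q
      rw [List.reverse_cons, List.foldl_append]
      simp only [List.foldl_cons, List.foldl_nil]
      rw [PySem.Dict.getD_insert]
      have hcons : pvSeq ((k, t) :: s) e = pvSeq s (if e == k then t else e) := rfl
      by_cases he : e = k
      · rw [if_pos he, ih t, hcons, if_pos (beq_iff_eq.mpr he)]
      · rw [if_neg he, ih e, hcons, if_neg (by simpa using he)]

-- L4: the substitution dict contains exactly the single-terminal keys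
theorem pv_subst_contains (subs : List (String × String)) (x : String) :
    (subs.reverse.foldl (fun d q => d.insert q.1 (d.getD q.2 q.2)) PySem.Dict.empty).contains x
      = decide (x ∈ subs.map Prod.fst) := by
  have hkeys : (subs.reverse.foldl (fun d q => d.insert q.1 (d.getD q.2 q.2)) PySem.Dict.empty).keys
      = PySem.Set.ofList (subs.reverse.map Prod.fst) := by
    rw [PySem.Dict.keys_foldl_insert_key subs.reverse Prod.fst
      (fun d q => d.getD q.2 q.2) PySem.Dict.empty]
    rw [PySem.Dict.keys_empty, PySem.Set.update_nil_left]
  have hmem := PySem.Dict.contains_iff_mem_keys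
    (subs.reverse.foldl (fun d q => d.insert q.1 (d.getD q.2 q.2)) PySem.Dict.empty) x
  rw [hkeys] at hmem
  by_cases hx : x ∈ subs.map Prod.fst
  · rw [hmem.mpr (by simpa [PySem.Set.mem_ofList] using hx), decide_eq_true hx]
  · rw [decide_eq_false hx, ← Bool.not_eq_true, hmem]
    simpa [PySem.Set.mem_ofList] using hx
  
-- L5: B's sweep, with the skips removed
theorem pv_foldl_skip_items {ν : Type} (c : String → Bool) (F : String × ν → ν)
    (step : PySem.Dict String ν → String × ν → PySem.Dict String ν)
    (hstep : ∀ r p, step r p = if c p.1 then r else r.insert p.1 (F p)) :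
    ∀ (l : List (String × ν)), (l.map Prod.fst).Nodup →
      (l.foldl step PySem.Dict.empty).items
        = (l.filter (fun p => !c p.1)).map (fun p => (p.1, F p)) := by
  have hskip : ∀ (l : List (String × ν)) (r : PySem.Dict String ν),
      l.foldl step r = (l.filter (fun p => !c p.1)).foldl (fun r p => r.insert p.1 (F p)) r := by
    intro l
    induction l with
    | nil => intro r; rfl
    | cons p rest ih =>
        intro r
        rw [List.foldl_cons, hstep]
        cases hc : c p.1 <;> simp [hc, ih]
  intro l hnd
  rw [hskip]
  have := PySem.Dict.items_foldl_insert_fresh (l.filter (fun p => !c p.1)) Prod.fst F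
    PySem.Dict.empty (fun a _ => PySem.Dict.contains_empty a.1)
    ((List.filter_sublist.map Prod.fst).nodup hnd)
  simpa using this

-- the second-loop step, in conditional form
theorem pv_phase2_step (r : PySem.Dict String (List (List String))) (p : String × List (List String)) :
    (match p.2 with
     | [opt] =>
         if decide (1 < opt.length) && opt.all (fun e => !pvIsUpperStr e) then
           r.insert p.1 [[PySem.Str.join "" opt]]
         else r
     | _ => r)
    = if pvC2 p.2 then r.insert p.1 (pvF2 p.2) else r := by
  obtain ⟨k, v⟩ := p
  rcases v with _ | ⟨o, os⟩
  · rfl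
  rcases os with _ | _
  · by_cases hc : (decide (1 < o.length) && o.all (fun e => !pvIsUpperStr e)) = true <;>
      simp [pvC2, pvF2, hc]
  · rfl

theorem pv_collapse_eq (k : String) (v : List (List String)) :
    (if pvC2 v then (k, pvF2 v) else (k, v)) = (k, pvCollapse v) := by
  rcases v with _ | ⟨o, os⟩
  · rfl
  rcases os with _ | _
  · by_cases hc : (decide (1 < o.length) && o.all (fun e => !pvIsUpperStr e)) = true <;>
      simp [pvC2, pvF2, pvCollapse, hc]
  · rfl

-- B's singles filter, relating the length tests to the list shape
theorem pv_singles_fun_eq :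
    (fun (p : String × List (List String)) =>
      if p.2.length == 1 && (p.2.headD []).length == 1 && !pvIsUpperStr ((p.2.headD []).headD "") then
        some (p.1, (p.2.headD []).headD "")
      else none)
    = (fun (p : String × List (List String)) =>
      match p.2 with
      | [[t]] => if pvIsUpperStr t then none else some (p.1, t)
      | _ => none) := by
  funext p
  obtain ⟨k, v⟩ := p
  rcases v with _ | ⟨o, os⟩
  · rfl
  rcases o with _ | ⟨t, ts⟩
  · rcases os with _ | _ <;> rfl
  rcases ts with _ | ⟨t2, ts2⟩
  · rcases os with _ | _
    · by_cases hup : pvIsUpperStr t = true <;> simp [hup]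
    · rfl
  · rcases os with _ | _ <;> rfl

-- B's collapse test, relating the length tests to the list shape
theorem pv_collapse_if (nv : List (List String)) :
    (if nv.length == 1 && decide (1 < (nv.headD []).length) &&
        (nv.headD []).all (fun e => !pvIsUpperStr e) then
      [[PySem.Str.join "" (nv.headD [])]]
    else nv)
    = pvCollapse nv := by
  rcases nv with _ | ⟨o, os⟩
  · rfl
  rcases os with _ | _
  · by_cases hc : (decide (1 < o.length) && o.all (fun e => !pvIsUpperStr e)) = true <;>
      simp [pvCollapse, hc]
  · rfl

-- ===== VERDICT (by name: the statement is the Claim_ definition above) =====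
theorem reduce_grammar_spec : Claim_equal_reduce_grammar := by
  intro grammar _
  unfold Spec_reduce_grammar reduce_grammar reduce_grammar_alt
  have hgnd : (PySem.Dict.ofList grammar : PySem.Dict String (List (List String))).keys.Nodup :=
    PySem.Dict.nodup_keys_ofList grammar
  simp only []
  set g := (PySem.Dict.ofList grammar : PySem.Dict String (List (List String))) with hg
  -- name B's singles and subst
  have hSing : (g.items.filterMap (fun p =>
      if p.2.length == 1 && (p.2.headD []).length == 1 && !pvIsUpperStr ((p.2.headD []).headD "") then
        some (p.1, (p.2.headD []).headD "")
      else none)) = pvSing g.items := by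
    rw [pv_singles_fun_eq]; rfl
  rw [hSing]
  set S := pvSing g.items with hS
  set subst := S.reverse.foldl (fun d q => d.insert q.1 (d.getD q.2 q.2)) PySem.Dict.empty with hsubst
  -- A's first loop, in closed form
  have h1 := pv_phase1
    (fun r p =>
      match p.2 with
      | [[t]] => if pvIsUpperStr t then r else replace_symbol_values (r.erase p.1) p.1 t
      | _ => r)
    (fun r p => by
      obtain ⟨k, v⟩ := p
      rcases v with _ | ⟨o, os⟩
      · rfl
      rcases o with _ | ⟨t, ts⟩
      · rcases os with _ | _ <;> rfl
      rcases ts with _ | ⟨t2, ts2⟩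
      · rcases os with _ | _
        · by_cases hup : pvIsUpperStr t = true <;> simp [pvCond, hup]
        · rfl
      · rcases os with _ | _ <;> rfl)
    g.items g hgnd
  rw [h1]
  -- A's second loop, in closed form
  have hknd1 : ((List.map (fun q => (q.1, pvSubVal (pvSing g.items) q.2))
      (List.filter (fun q => decide (q.1 ∉ List.map Prod.fst (pvSing g.items))) g.items)).map
      Prod.fst).Nodup := by
    rw [List.map_map]
    have hcomp : (Prod.fst ∘ fun (q : String × List (List String)) =>
        (q.1, pvSubVal (pvSing g.items) q.2)) = Prod.fst := rfl
    rw [hcomp]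
    exact (List.filter_sublist.map _).nodup hgnd
  have h2 := pv_foldl_update (fun p => pvC2 p.2) (fun p => pvF2 p.2)
    (fun r p =>
      match p.2 with
      | [opt] =>
          if decide (1 < opt.length) && opt.all (fun e => !pvIsUpperStr e) then
            r.insert p.1 [[PySem.Str.join "" opt]]
          else r
      | _ => r)
    (fun r p => pv_phase2_step r p)
    (List.map (fun q => (q.1, pvSubVal (pvSing g.items) q.2))
      (List.filter (fun q => decide (q.1 ∉ List.map Prod.fst (pvSing g.items))) g.items))
    []
    (List.foldl
      (fun r p =>
        match p.2 with
        | [[t]] => if pvIsUpperStr t then r else replace_symbol_values (r.erase p.1) p.1 t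
        | _ => r) g g.items)
    (by rw [h1]; simp)
    (by simpa using hknd1)
  rw [h2]
  -- B's sweep, in closed form
  have h3 := pv_foldl_skip_items (fun k => subst.contains k)
    (fun p => pvCollapse (p.2.map (fun opt => opt.map (fun e => subst.getD e e))))
    (fun r p =>
      if subst.contains p.1 then r
      else r.insert p.1
        (if (p.2.map (fun opt => opt.map (fun e => subst.getD e e))).length == 1 &&
            decide (1 < ((p.2.map (fun opt => opt.map (fun e => subst.getD e e))).headD []).length) &&
            ((p.2.map (fun opt => opt.map (fun e => subst.getD e e))).headD []).all
              (fun e => !pvIsUpperStr e) then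
          [[PySem.Str.join "" ((p.2.map (fun opt => opt.map (fun e => subst.getD e e))).headD [])]]
        else p.2.map (fun opt => opt.map (fun e => subst.getD e e))))
    (fun r p => by
      cases hc : subst.contains p.1 <;>
        simp only [hc, Bool.false_eq_true, if_false, if_true, pv_collapse_if])
    g.items (by simpa [PySem.Dict.keys] using hgnd)
  rw [h3]
  simp only [List.nil_append, List.map_map]
  have hfun : (fun e => subst.getD e e) = pvSeq (pvSing g.items) := by
    rw [hsubst, hS]
    exact funext (pv_subst_getD (pvSing g.items))
  have hfilter : List.filter (fun p => !subst.contains p.1) g.items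
      = List.filter (fun q => decide (q.1 ∉ List.map Prod.fst (pvSing g.items))) g.items :=
    List.filter_congr (fun a _ => by
      rw [hsubst, hS, pv_subst_contains]
      simp [decide_not])
  rw [hfilter]
  exact List.map_congr_left (fun a _ => by
    simp only [Function.comp_def]
    rw [hfun]
    exact pv_collapse_eq a.1 (pvSubVal (pvSing g.items) a.2))
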